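-- pv_equiv track=rewrite | github.com/craftidev/playground | AdventOfCode2023/03/day3_2.py | chunking_next_element
-- ===== SOURCE A (Python) =====
-- def chunking_next_element(line):
--     is_number = False
--     element = ''
--
--     for char in line:
--         if char != '*' and not char.isdigit():
--             if is_number:
--                 return element
--             continue
--
--         if char.isdigit():
--             is_number = True
--             element += str(char)
--         else:
--             if is_number:
--                 return element
--             return char
--
--     return element
-- ===== SOURCE B (Python) =====
-- def chunking_next_element(line):
--     # Locate-then-extract: find start of first '*' or digit, then slice out the token.
--     start = None
--     for i, ch in enumerate(line):
--         if ch == '*' or ch.isdigit():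
--             start = i
--             break
--     if start is None:
--         return ''
--     if line[start] == '*':
--         return '*'
--     end = start
--     while end < len(line) and line[end].isdigit():
--         end += 1
--     return line[start:end]
-- ===== Notes on version B (the rewrite author's own statement) =====
-- stated objective: alternative
-- what changed: Replaced A's single interleaved state machine (is_number flag plus character-by-character accumulator with multiple early returns) by a two-phase locate-then-extract scan: find the index of the first star-or-digit character, then slice the digit run (or return the star) directly from the line.
import Mathlib
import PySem

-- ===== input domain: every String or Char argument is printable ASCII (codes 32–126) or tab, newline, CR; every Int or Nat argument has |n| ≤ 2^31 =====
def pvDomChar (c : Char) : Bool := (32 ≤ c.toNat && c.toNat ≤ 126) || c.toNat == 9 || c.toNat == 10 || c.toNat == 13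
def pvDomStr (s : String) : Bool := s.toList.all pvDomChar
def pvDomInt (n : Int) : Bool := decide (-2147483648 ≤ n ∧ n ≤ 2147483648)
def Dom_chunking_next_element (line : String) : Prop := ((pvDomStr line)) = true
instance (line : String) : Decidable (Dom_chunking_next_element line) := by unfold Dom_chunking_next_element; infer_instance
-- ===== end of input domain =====

-- B replaces A's interleaved state machine by a locate-then-extract two-phase scan (alternative decomposition, same cost).

-- ===== PORT A =====
-- A's for-loop with state (is_number, element) and its early returns, step for step.
def chunkA : List Char → Bool → List Char → List Char
  | [], _, elem => elem
  | c :: rest, isNum, elem =>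
    if c ≠ '*' ∧ PySem.Chars.isdigit c = false then
      (if isNum then elem else chunkA rest isNum elem)   -- return element / continue
    else if PySem.Chars.isdigit c then
      chunkA rest true (elem ++ [c])                     -- element += char
    else
      (if isNum then elem else [c])                      -- return element / return char

def chunking_next_element (line : String) : String :=
  String.mk (chunkA line.toList false [])

-- ===== PORT B =====
-- Source B's first loop: index of the first '*' or digit (None if absent).
def findStartB : List Char → Nat → Option Nat
  | [], _ => none
  | c :: rest, i =>
    if c == '*' || PySem.Chars.isdigit c then some i else findStartB rest (i + 1)

-- Source B's while loop (short-circuit `and`): advance `end` over digits.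
def runEndB (cs : List Char) (e : Nat) : Nat :=
  if h : e < cs.length then
    if PySem.Chars.isdigit cs[e] then runEndB cs (e + 1) else e
  else e
  termination_by cs.length - e
  decreasing_by omega

def chunking_next_element_alt (line : String) : String :=
  match findStartB line.toList 0 with
  | none => ""
  | some start =>
    if line.toList.getD start ' ' == '*' then "*"
    else
      -- line[start:end] with 0 ≤ start ≤ end ≤ len: exact Python slice on this range
      String.mk ((line.toList.drop start).take (runEndB line.toList start - start))

-- ===== PRECONDITION & SPEC =====
def Spec_chunking_next_element (line : String) (out : String) : Prop := out = chunking_next_element_alt line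
instance (line : String) (out : String) : Decidable (Spec_chunking_next_element line out) := by unfold Spec_chunking_next_element; infer_instance

-- ===== CLAIM (what is proved, stated in full; the proofs are below) =====
def Claim_equal_chunking_next_element : Prop := ∀ (line : String), Dom_chunking_next_element line → Spec_chunking_next_element line (chunking_next_element line)

-- ===== LEMMAS AND PROOFS =====

-- Once A is in number state, it returns the accumulator extended by the leading digit run.
theorem chunkA_true (l : List Char) : ∀ ds, chunkA l true ds = ds ++ l.takeWhile PySem.Chars.isdigit := by
  induction l with
  | nil => simp [chunkA]
  | cons c rest ih =>
    intro ds
    by_cases hd : PySem.Chars.isdigit c = true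
    · have hstar : c ≠ '*' := by
        intro h; subst h; simp [PySem.Chars.isdigit] at hd
      simp [chunkA, hd, hstar, ih, List.takeWhile_cons]
    · by_cases hs : c = '*'
      · subst hs; simp [chunkA, PySem.Chars.isdigit, List.takeWhile_cons]
      · simp [chunkA, hs, hd, List.takeWhile_cons]

theorem findStartB_eq (l : List Char) : ∀ i,
    findStartB l i = (l.findIdx? (fun c => c == '*' || PySem.Chars.isdigit c)).map (· + i) := by
  induction l with
  | nil => intro i; simp [findStartB]
  | cons c rest ih =>
    intro i
    by_cases hp : (c == '*' || PySem.Chars.isdigit c) = true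
    · simp [findStartB, hp, List.findIdx?_cons]
    · simp only [findStartB, hp, if_false, List.findIdx?_cons, ih (i + 1), Option.map_map]
      cases rest.findIdx? (fun c => c == '*' || PySem.Chars.isdigit c) with
      | none => simp
      | some j => simp; omega

theorem runEndB_eq (cs : List Char) : ∀ e,
    runEndB cs e = e + ((cs.drop e).takeWhile PySem.Chars.isdigit).length := by
  intro e
  induction h : cs.length - e using Nat.strong_induction_on generalizing e with
  | _ n ih =>
    by_cases hlt : e < cs.length
    · have hdrop : cs.drop e = cs[e] :: cs.drop (e + 1) := List.drop_eq_getElem_cons hlt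
      by_cases hd : PySem.Chars.isdigit cs[e] = true
      · have htw : (cs.drop e).takeWhile PySem.Chars.isdigit
            = cs[e] :: (cs.drop (e + 1)).takeWhile PySem.Chars.isdigit := by
          rw [hdrop, List.takeWhile_cons]; simp [hd]
        rw [runEndB]
        simp only [hlt, dite_true, hd, if_true]
        rw [ih (cs.length - (e + 1)) (by omega) (e + 1) rfl, htw]
        simp
        omega
      · rw [runEndB]
        simp only [hlt, dite_true, hd, if_false]
        rw [hdrop]
        simp [List.takeWhile_cons, hd]
    · rw [runEndB]
      simp only [hlt, dite_false]
      rw [List.drop_eq_nil_of_le (by omega)]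
      simp

theorem take_takeWhile_len (p : Char → Bool) (l : List Char) :
    l.take (l.takeWhile p).length = l.takeWhile p := by
  induction l with
  | nil => simp
  | cons c rest ih =>
    by_cases hp : p c = true
    · simp [List.takeWhile_cons, hp, ih]
    · simp [List.takeWhile_cons, hp]

-- B's result, expressed over the findIdx? of the token predicate.
def altCore (cs : List Char) (o : Option Nat) : String :=
  match o with
  | none => ""
  | some j =>
    if cs.getD j ' ' == '*' then "*"
    else String.mk ((cs.drop j).takeWhile PySem.Chars.isdigit)

theorem alt_eq_core (line : String) :
    chunking_next_element_alt line =
      altCore line.toList (line.toList.findIdx? (fun c => c == '*' || PySem.Chars.isdigit c)) := by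
  unfold chunking_next_element_alt altCore
  rw [findStartB_eq]
  cases h : line.toList.findIdx? (fun c => c == '*' || PySem.Chars.isdigit c) with
  | none => simp
  | some j =>
    simp only [Option.map_some, Nat.add_zero]
    split_ifs with hs
    · rfl
    · rw [runEndB_eq, Nat.add_sub_cancel_left, take_takeWhile_len]

theorem chunkA_eq_core (cs : List Char) :
    String.mk (chunkA cs false []) =
      altCore cs (cs.findIdx? (fun c => c == '*' || PySem.Chars.isdigit c)) := by
  induction cs with
  | nil => rfl
  | cons c rest ih =>
    by_cases hd : PySem.Chars.isdigit c = true
    · have hstar : c ≠ '*' := by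
        intro h; subst h; simp [PySem.Chars.isdigit] at hd
      have hp : (c == '*' || PySem.Chars.isdigit c) = true := by simp [hd]
      rw [List.findIdx?_cons]
      simp only [hp, if_true]
      simp [chunkA, hd, hstar, chunkA_true, altCore, beq_iff_eq, hstar]
    · by_cases hs : c = '*'
      · subst hs
        rw [List.findIdx?_cons]
        simp [chunkA, PySem.Chars.isdigit, altCore]
        rfl
      · have hp : (c == '*' || PySem.Chars.isdigit c) = false := by
          simp [hs, hd]
        have hstep : chunkA (c :: rest) false [] = chunkA rest false [] := by
          simp [chunkA, hs, hd]
        rw [List.findIdx?_cons, hp, if_neg (by simp), hstep, ih]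
        cases rest.findIdx? (fun c => c == '*' || PySem.Chars.isdigit c) with
        | none => rfl
        | some j => simp [altCore]

-- ===== VERDICT (by name: the statement is the Claim_ definition above) =====
theorem chunking_next_element_spec : Claim_equal_chunking_next_element := by
  intro line _
  unfold Spec_chunking_next_element chunking_next_element
  rw [alt_eq_core, chunkA_eq_core]
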